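-- pv_equiv track=rewrite | github.com/torad-labs/qgre-engine | qgre/segments.py | qwen3_xml_segmenter
-- ===== SOURCE A (Python) =====
-- THINK_START = 151667
--
-- THINK_END = 151668
--
-- STEP_TOKEN = 9520
--
-- OPEN_ANGLE = 27
--
-- CLOSE_SLASH = 522
--
-- CLOSE_ANGLE = 29
--
-- STEP_NUM_TOKENS = {16: 1, 17: 2, 18: 3, 19: 4, 20: 5, 21: 6, 22: 7, 23: 8, 24: 9}
--
-- def qwen3_xml_segmenter(token_ids: list[int]) -> list[str]:
--     """Segment Qwen3 completions with <stepN_...> XML tags.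
--
--     Assigns each token to: THINK, STEP_1..N, FORMAT, or OTHER.
--     Uses token ID patterns, not decoded text.
--     """
--     regions = ["OTHER"] * len(token_ids)
--     current = "OTHER"
--     n = len(token_ids)
--
--     i = 0
--     while i < n:
--         tid = token_ids[i]
--
--         if tid == THINK_START:
--             current = "THINK"
--             regions[i] = "THINK"
--             i += 1
--             continue
--
--         if tid == THINK_END:
--             regions[i] = "THINK"
--             current = "OTHER"
--             i += 1
--             continue
--
--         if tid == OPEN_ANGLE and i + 2 < n:
--             if token_ids[i + 1] == STEP_TOKEN and token_ids[i + 2] in STEP_NUM_TOKENS: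
--                 step = STEP_NUM_TOKENS[token_ids[i + 2]]
--                 current = f"STEP_{step}"
--                 j = i
--                 while j < n and token_ids[j] != CLOSE_ANGLE:
--                     regions[j] = "FORMAT"
--                     j += 1
--                 if j < n:
--                     regions[j] = "FORMAT"
--                 i = j + 1
--                 continue
--
--         if tid == CLOSE_SLASH and i + 2 < n:
--             if token_ids[i + 1] == STEP_TOKEN and token_ids[i + 2] in STEP_NUM_TOKENS:
--                 j = i
--                 while j < n and token_ids[j] != CLOSE_ANGLE:
--                     regions[j] = "FORMAT"
--                     j += 1
--                 if j < n:
--                     regions[j] = "FORMAT"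
--                 current = "OTHER"
--                 i = j + 1
--                 continue
--
--         regions[i] = current
--         i += 1
--
--     return regions
-- ===== SOURCE B (Python) =====
-- THINK_START = 151667
-- THINK_END = 151668
-- STEP_TOKEN = 9520
-- OPEN_ANGLE = 27
-- CLOSE_SLASH = 522
-- CLOSE_ANGLE = 29
-- STEP_NUM_TOKENS = {16: 1, 17: 2, 18: 3, 19: 4, 20: 5, 21: 6, 22: 7, 23: 8, 24: 9}
--
-- def qwen3_xml_segmenter(token_ids: list[int]) -> list[str]:
--     """Single flat pass with an in_format state flag: no inner rescan, no
--     index jumps; regions built by appending one label per token."""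
--     n = len(token_ids)
--     regions = []
--     current = "OTHER"
--     in_format = False
--     for i, tid in enumerate(token_ids):
--         if in_format:
--             regions.append("FORMAT")
--             in_format = tid != CLOSE_ANGLE
--         elif tid == THINK_START:
--             current = "THINK"
--             regions.append("THINK")
--         elif tid == THINK_END:
--             regions.append("THINK")
--             current = "OTHER"
--         elif (tid == OPEN_ANGLE and i + 2 < n
--               and token_ids[i + 1] == STEP_TOKEN
--               and token_ids[i + 2] in STEP_NUM_TOKENS):
--             current = f"STEP_{STEP_NUM_TOKENS[token_ids[i + 2]]}"
--             in_format = True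
--             regions.append("FORMAT")
--         elif (tid == CLOSE_SLASH and i + 2 < n
--               and token_ids[i + 1] == STEP_TOKEN
--               and token_ids[i + 2] in STEP_NUM_TOKENS):
--             current = "OTHER"
--             in_format = True
--             regions.append("FORMAT")
--         else:
--             regions.append(current)
--     return regions
-- ===== Notes on version B (the rewrite author's own statement) =====
-- stated objective: simpler
-- what changed: Replaced A's outer while-loop with a nested inner rescan that overwrites slots of a pre-allocated regions array and jumps the index past each tag, by a single flat pass carrying an in_format state flag that appends one label per token; no inner loop, no index jumps, no array mutation.
import Mathlib
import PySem

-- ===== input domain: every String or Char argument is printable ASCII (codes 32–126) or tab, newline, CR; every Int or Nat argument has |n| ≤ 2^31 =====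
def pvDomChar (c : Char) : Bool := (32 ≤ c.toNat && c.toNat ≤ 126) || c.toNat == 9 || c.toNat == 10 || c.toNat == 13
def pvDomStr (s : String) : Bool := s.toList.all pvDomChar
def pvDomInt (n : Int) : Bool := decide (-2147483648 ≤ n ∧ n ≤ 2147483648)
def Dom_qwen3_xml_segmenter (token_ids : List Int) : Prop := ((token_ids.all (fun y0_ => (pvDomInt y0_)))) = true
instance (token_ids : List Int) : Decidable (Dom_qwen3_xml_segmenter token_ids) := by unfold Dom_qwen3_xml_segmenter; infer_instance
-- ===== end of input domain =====

-- B replaces A's nested inner rescan + index jump over a pre-allocated array with one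
-- flat append-only pass carrying an in_format state flag (objective: simpler).
-- Loops are ported with explicit fuel (always sufficient: each iteration advances the index).

-- ===== PORT A =====

-- STEP_NUM_TOKENS (shared module constant of both Pythons)
def pvStepDict : PySem.Dict Int Int :=
  PySem.Dict.ofList [(16, 1), (17, 2), (18, 3), (19, 4), (20, 5), (21, 6), (22, 7), (23, 8), (24, 9)]

-- inner 'while j < n and token_ids[j] != CLOSE_ANGLE' of A (fuel bounds the scan; fuel > n - j suffices)
def pvInnerA (tokens : List Int) : Nat → List String → Nat → List String × Nat
  | 0, regions, j => (regions, j)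
  | fuel + 1, regions, j =>
    if j < tokens.length then
      if tokens.getD j 0 ≠ 29 then pvInnerA tokens fuel (regions.set j "FORMAT") (j + 1)
      else (regions, j)
    else (regions, j)

-- A's outer while loop (fuel > n - i suffices: i grows by at least 1 per iteration)
def pvLoopA (tokens : List Int) : Nat → List String → String → Nat → List String
  | 0, regions, _, _ => regions
  | fuel + 1, regions, current, i =>
    if i < tokens.length then
      let tid := tokens.getD i 0
      if tid = 151667 then pvLoopA tokens fuel (regions.set i "THINK") "THINK" (i + 1)
      else if tid = 151668 then pvLoopA tokens fuel (regions.set i "THINK") "OTHER" (i + 1)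
      else if tid = 27 ∧ i + 2 < tokens.length then
        if tokens.getD (i + 1) 0 = 9520 ∧ pvStepDict.contains (tokens.getD (i + 2) 0) then
          let current' := "STEP_" ++ PySem.Int.toStr (pvStepDict.getD (tokens.getD (i + 2) 0) 0)
          let p := pvInnerA tokens (tokens.length - i + 1) regions i
          pvLoopA tokens fuel (if p.2 < tokens.length then p.1.set p.2 "FORMAT" else p.1) current' (p.2 + 1)
        else pvLoopA tokens fuel (regions.set i current) current (i + 1)
      else if tid = 522 ∧ i + 2 < tokens.length then
        if tokens.getD (i + 1) 0 = 9520 ∧ pvStepDict.contains (tokens.getD (i + 2) 0) then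
          let p := pvInnerA tokens (tokens.length - i + 1) regions i
          pvLoopA tokens fuel (if p.2 < tokens.length then p.1.set p.2 "FORMAT" else p.1) "OTHER" (p.2 + 1)
        else pvLoopA tokens fuel (regions.set i current) current (i + 1)
      else pvLoopA tokens fuel (regions.set i current) current (i + 1)
    else regions

def qwen3_xml_segmenter (token_ids : List Int) : List String :=
  pvLoopA token_ids (token_ids.length + 1) (List.replicate token_ids.length "OTHER") "OTHER" 0


-- ===== PORT B =====

-- B's single flat for-loop: state (current, in_format); fuel = number of remaining iterations n - i
def pvGoB (tokens : List Int) : Nat → String → Bool → Nat → List String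
  | 0, _, _, _ => []
  | fuel + 1, current, inFormat, i =>
    if i < tokens.length then
      let tid := tokens.getD i 0
      if inFormat then
        "FORMAT" :: pvGoB tokens fuel current (tid != 29) (i + 1)
      else if tid = 151667 then "THINK" :: pvGoB tokens fuel "THINK" false (i + 1)
      else if tid = 151668 then "THINK" :: pvGoB tokens fuel "OTHER" false (i + 1)
      else if tid = 27 ∧ i + 2 < tokens.length ∧ tokens.getD (i + 1) 0 = 9520 ∧
              pvStepDict.contains (tokens.getD (i + 2) 0) then
        "FORMAT" :: pvGoB tokens fuel ("STEP_" ++ PySem.Int.toStr (pvStepDict.getD (tokens.getD (i + 2) 0) 0)) true (i + 1)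
      else if tid = 522 ∧ i + 2 < tokens.length ∧ tokens.getD (i + 1) 0 = 9520 ∧
              pvStepDict.contains (tokens.getD (i + 2) 0) then
        "FORMAT" :: pvGoB tokens fuel "OTHER" true (i + 1)
      else current :: pvGoB tokens fuel current false (i + 1)
    else []

def qwen3_xml_segmenter_alt (token_ids : List Int) : List String :=
  pvGoB token_ids token_ids.length "OTHER" false 0


-- ===== PRECONDITION & SPEC =====
def Spec_qwen3_xml_segmenter (token_ids : List Int) (out : List String) : Prop := out = qwen3_xml_segmenter_alt token_ids
instance (token_ids : List Int) (out : List String) : Decidable (Spec_qwen3_xml_segmenter token_ids out) := by unfold Spec_qwen3_xml_segmenter; infer_instance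

-- ===== CLAIM (what is proved, stated in full; the proofs are below) =====
def Claim_equal_qwen3_xml_segmenter : Prop := ∀ (token_ids : List Int), Dom_qwen3_xml_segmenter token_ids → Spec_qwen3_xml_segmenter token_ids (qwen3_xml_segmenter token_ids)

-- ===== LEMMAS AND PROOFS =====

theorem pv_take_set (l : List String) (j : Nat) (a : String) (h : j < l.length) :
    (l.set j a).take (j + 1) = l.take j ++ [a] := by
  induction l generalizing j with
  | nil => simp at h
  | cons x xs ih =>
    cases j with
    | zero => simp
    | succ k => simp_all [List.set, List.take_succ_cons]

theorem pvJoint (tokens : List Int) : ∀ m : Nat,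
    (∀ fuelI fuelA j regions current, tokens.length - j < fuelI → tokens.length - j ≤ m →
      j ≤ tokens.length → tokens.length - j ≤ fuelA → regions.length = tokens.length →
      (pvLoopA tokens fuelA
        (if (pvInnerA tokens fuelI regions j).2 < tokens.length then
            (pvInnerA tokens fuelI regions j).1.set (pvInnerA tokens fuelI regions j).2 "FORMAT"
          else (pvInnerA tokens fuelI regions j).1) current ((pvInnerA tokens fuelI regions j).2 + 1))
        = regions.take j ++ pvGoB tokens (tokens.length - j) current true j)
    ∧
    (∀ fuelA i regions current, tokens.length - i < fuelA → tokens.length - i ≤ m →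
      i ≤ tokens.length → regions.length = tokens.length →
      pvLoopA tokens fuelA regions current i
        = regions.take i ++ pvGoB tokens (tokens.length - i) current false i) := by
  intro m
  induction m with
  | zero =>
    constructor
    · intro fuelI fuelA j regions current hfi hm hj hfa hlen
      have hj' : j = tokens.length := by omega
      subst hj'
      obtain ⟨f, rfl⟩ : ∃ f, fuelI = f + 1 := ⟨fuelI - 1, by omega⟩
      simp only [pvInnerA, lt_irrefl, if_false]
      have h0 : tokens.length - tokens.length = 0 := by omega
      rw [h0]
      cases fuelA with
      | zero => simp [pvLoopA, pvGoB, List.take_of_length_le (le_of_eq hlen)]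
      | succ f' => simp [pvLoopA, pvGoB, List.take_of_length_le (le_of_eq hlen)]
    · intro fuelA i regions current hfa hm hi hlen
      have h1 : i = tokens.length := by omega
      subst h1
      have h0 : tokens.length - tokens.length = 0 := by omega
      rw [h0]
      obtain ⟨f, rfl⟩ : ∃ f, fuelA = f + 1 := ⟨fuelA - 1, by omega⟩
      simp [pvLoopA, pvGoB, List.take_of_length_le (le_of_eq hlen)]
  | succ m ih =>
    have hInner : ∀ fuelI fuelA j regions current, tokens.length - j < fuelI →
        tokens.length - j ≤ m + 1 → j ≤ tokens.length → tokens.length - j ≤ fuelA →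
        regions.length = tokens.length →
        (pvLoopA tokens fuelA
          (if (pvInnerA tokens fuelI regions j).2 < tokens.length then
              (pvInnerA tokens fuelI regions j).1.set (pvInnerA tokens fuelI regions j).2 "FORMAT"
            else (pvInnerA tokens fuelI regions j).1) current ((pvInnerA tokens fuelI regions j).2 + 1))
          = regions.take j ++ pvGoB tokens (tokens.length - j) current true j := by
      intro fuelI fuelA j regions current hfi hm hj hfa hlen
      induction fuelI generalizing j regions with
      | zero => omega
      | succ f ihf =>
        by_cases hjn : j < tokens.length
        · have hg : tokens.getD j 0 = tokens[j] := List.getD_eq_getElem tokens 0 hjn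
          have hnj : tokens.length - j = (tokens.length - (j + 1)) + 1 := by omega
          by_cases hc : tokens.getD j 0 = 29
          · -- CLOSE_ANGLE found: A sets regions[j]="FORMAT" and resumes the outer loop at j+1
            simp only [pvInnerA, if_pos hjn, hc, ne_eq, not_true_eq_false, if_false]
            rw [ih.2 fuelA (j + 1) (regions.set j "FORMAT") current (by omega) (by omega)
              (by omega) (by simpa using hlen)]
            rw [pv_take_set regions j "FORMAT" (by omega)]
            rw [hnj]
            simp only [pvGoB, if_pos hjn, if_true]
            have hbf : (tokens.getD j 0 != 29) = false := by rw [hc]; decide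
            rw [hbf]
            simp
          · -- keep scanning: regions[j]="FORMAT", j+1
            simp only [pvInnerA, if_pos hjn, hc, ne_eq, not_false_eq_true, if_true]
            rw [ihf (j + 1) (regions.set j "FORMAT") (by omega) (by omega) (by omega) (by omega)
              (by simpa using hlen)]
            rw [pv_take_set regions j "FORMAT" (by omega)]
            rw [hnj]
            simp only [pvGoB, if_pos hjn, if_true]
            have hbt : (tokens.getD j 0 != 29) = true := by
              simp only [bne_iff_ne]
              exact hc
            rw [hbt]
            simp
        · have hj' : j = tokens.length := by omega
          subst hj'
          simp only [pvInnerA, lt_irrefl, if_false]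
          have h0 : tokens.length - tokens.length = 0 := by omega
          rw [h0]
          cases fuelA with
          | zero => simp [pvLoopA, pvGoB, List.take_of_length_le (le_of_eq hlen)]
          | succ f' => simp [pvLoopA, pvGoB, List.take_of_length_le (le_of_eq hlen)]
    constructor
    · exact hInner
    · intro fuelA i regions current hfa hm hi hlen
      by_cases hin : i < tokens.length
      · obtain ⟨f, rfl⟩ : ∃ f, fuelA = f + 1 := ⟨fuelA - 1, by omega⟩
        have hni : tokens.length - i = (tokens.length - (i + 1)) + 1 := by omega
        have hstep : ∀ v cur2 : String, pvLoopA tokens f (regions.set i v) cur2 (i + 1)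
            = regions.take i ++ v :: pvGoB tokens (tokens.length - (i + 1)) cur2 false (i + 1) := by
          intro v cur2
          rw [ih.2 f (i + 1) (regions.set i v) cur2 (by omega) (by omega) (by omega)
            (by simpa using hlen), pv_take_set regions i v (by omega)]
          simp
        have htag : ∀ cur' : String, tokens.getD i 0 ≠ 29 →
            pvLoopA tokens f
              (if (pvInnerA tokens (tokens.length - i + 1) regions i).2 < tokens.length then
                  (pvInnerA tokens (tokens.length - i + 1) regions i).1.set
                    (pvInnerA tokens (tokens.length - i + 1) regions i).2 "FORMAT"
                else (pvInnerA tokens (tokens.length - i + 1) regions i).1)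
              cur' ((pvInnerA tokens (tokens.length - i + 1) regions i).2 + 1)
            = regions.take i ++ "FORMAT" :: pvGoB tokens (tokens.length - (i + 1)) cur' true (i + 1) := by
          intro cur' hne
          rw [hInner (tokens.length - i + 1) f i regions cur' (by omega) (by omega) (by omega)
            (by omega) hlen]
          rw [hni]
          simp only [pvGoB, if_pos hin, if_true]
          have hb : (tokens.getD i 0 != 29) = true := by
            simp only [bne_iff_ne]
            exact hne
          rw [hb]
        conv_lhs => rw [pvLoopA]
        conv_rhs => rw [hni]
        conv_rhs => rw [pvGoB]
        simp only [if_pos hin]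
        by_cases h1 : tokens.getD i 0 = 151667
        · simp only [h1]
          norm_num
          exact hstep "THINK" "THINK"
        · by_cases h2 : tokens.getD i 0 = 151668
          · simp only [h2]
            norm_num
            exact hstep "THINK" "OTHER"
          · by_cases h27 : tokens.getD i 0 = 27
            · by_cases hb2 : i + 2 < tokens.length
              · by_cases hcnd : tokens.getD (i + 1) 0 = 9520 ∧ pvStepDict.contains (tokens.getD (i + 2) 0)
                · simp only [h27, hcnd.1, hcnd.2]
                  norm_num [hb2]
                  exact htag _ (by rw [h27]; decide)
                · simp only [h27]
                  norm_num [hb2]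
                  rw [if_neg, if_neg]
                  · exact hstep current current
                  · intro hx
                    exact hcnd ⟨by simpa [List.getD_eq_getElem?_getD] using hx.1,
                      by rw [List.getD_eq_getElem tokens 0 hb2]; exact hx.2⟩
                  · intro hx
                    exact hcnd ⟨by simpa [List.getD_eq_getElem?_getD] using hx.1,
                      by rw [List.getD_eq_getElem tokens 0 hb2]; exact hx.2⟩
              · simp only [h27]
                norm_num [hb2]
                exact hstep current current
            · by_cases h522 : tokens.getD i 0 = 522
              · by_cases hb2 : i + 2 < tokens.length
                · by_cases hcnd : tokens.getD (i + 1) 0 = 9520 ∧ pvStepDict.contains (tokens.getD (i + 2) 0)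
                  · simp only [h522, hcnd.1, hcnd.2]
                    norm_num [hb2]
                    exact htag _ (by rw [h522]; decide)
                  · simp only [h522]
                    norm_num [hb2]
                    rw [if_neg, if_neg]
                    · exact hstep current current
                    · intro hx
                      exact hcnd ⟨by simpa [List.getD_eq_getElem?_getD] using hx.1,
                        by rw [List.getD_eq_getElem tokens 0 hb2]; exact hx.2⟩
                    · intro hx
                      exact hcnd ⟨by simpa [List.getD_eq_getElem?_getD] using hx.1,
                        by rw [List.getD_eq_getElem tokens 0 hb2]; exact hx.2⟩
                · simp only [h522]
                  norm_num [hb2]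
                  exact hstep current current
              · simp only [List.getD_eq_getElem?_getD] at h1 h2 h27 h522
                norm_num [h1, h2, h27, h522]
                exact hstep current current
      · have h1 : i = tokens.length := by omega
        subst h1
        have h0 : tokens.length - tokens.length = 0 := by omega
        rw [h0]
        obtain ⟨f, rfl⟩ : ∃ f, fuelA = f + 1 := ⟨fuelA - 1, by omega⟩
        simp [pvLoopA, pvGoB, List.take_of_length_le (le_of_eq hlen)]



-- ===== VERDICT (by name: the statement is the Claim_ definition above) =====
theorem qwen3_xml_segmenter_spec : Claim_equal_qwen3_xml_segmenter := by
  intro token_ids _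
  have h := (pvJoint token_ids token_ids.length).2 (token_ids.length + 1) 0
    (List.replicate token_ids.length "OTHER") "OTHER" (by omega) (by omega) (by omega) (by simp)
  simpa [Spec_qwen3_xml_segmenter, qwen3_xml_segmenter, qwen3_xml_segmenter_alt] using h
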